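-- pv_equiv track=rewrite | github.com/JuniorDevNam/Python | Lớp 11/Bài tập/baitoan.py | cau7
-- ===== SOURCE A (Python) =====
-- n=10
--
-- def cau7(a):
--     ds = sorted(a, reverse=True)
--     nhi = ds[1]
--     vt = []
--     for x in range(n):
--         if a[x] == nhi:
--             vt.append(x+1)
--     return nhi, vt
-- ===== SOURCE B (Python) =====
-- n = 10
--
-- def cau7(a):
--     # one linear pass keeping the two largest values (with multiplicity)
--     first, second = a[0], a[1]
--     if second > first:
--         first, second = second, first
--     for x in a[2:]:
--         if x > first:
--             second = first
--             first = x
--         elif x > second: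
--             second = x
--     vt = [x + 1 for x in range(n) if a[x] == second]
--     return second, vt
-- ===== Notes on version B (the rewrite author's own statement) =====
-- stated objective: alternative
-- what changed: B replaces A's full descending sort (read only for its second element) with a single linear two-slot pass that maintains the largest and second-largest values with multiplicity; positions are collected by a comprehension over range(n).
import Mathlib
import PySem

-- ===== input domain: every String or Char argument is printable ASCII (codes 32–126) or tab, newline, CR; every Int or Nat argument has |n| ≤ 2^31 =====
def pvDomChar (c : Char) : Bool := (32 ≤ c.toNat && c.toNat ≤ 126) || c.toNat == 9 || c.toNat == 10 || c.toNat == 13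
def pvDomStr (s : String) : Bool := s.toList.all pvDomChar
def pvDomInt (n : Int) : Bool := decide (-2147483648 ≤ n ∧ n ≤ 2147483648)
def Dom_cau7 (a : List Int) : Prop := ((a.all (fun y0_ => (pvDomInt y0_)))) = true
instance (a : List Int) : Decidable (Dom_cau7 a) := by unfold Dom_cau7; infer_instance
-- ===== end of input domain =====

-- B replaces A's sort with a single two-slot linear pass for the second-largest value and
-- collects the 1-based positions by a comprehension over range(n) (objective: alternative).

-- ===== PORT A =====
def cau7 (a : List Int) : Int × List Int :=
  let ds := PySem.List.sorted a (fun x => x) true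
  match PySem.List.pyGet? ds 1 with
  | none => (0, [])   -- ds[1] raises IndexError: excluded by Pre_cau7
  | some nhi =>
      (nhi, (PySem.List.pyRange 0 10 1).foldl (fun vt x =>
          match PySem.List.pyGet? a x with
          | none => vt   -- a[x] raises IndexError: excluded by Pre_cau7
          | some v => if v == nhi then vt ++ [x + 1] else vt) [])

-- ===== PORT B =====
def cau7_alt (a : List Int) : Int × List Int :=
  match a with
  | a0 :: a1 :: rest =>
      let fs0 := if a1 > a0 then (a1, a0) else (a0, a1)
      let fs := rest.foldl (fun (p : Int × Int) x =>
          if x > p.1 then (x, p.1) else if x > p.2 then (p.1, x) else p) fs0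
      let nhi := fs.2
      (nhi, (PySem.List.pyRange 0 10 1).filterMap (fun x =>
          match PySem.List.pyGet? (a0 :: a1 :: rest) x with
          | none => none   -- a[x] raises IndexError: excluded by Pre_cau7
          | some v => if v == nhi then some (x + 1) else none))
  | _ => (0, [])   -- a[0]/a[1] raises IndexError: excluded by Pre_cau7

-- ===== PRECONDITION & SPEC =====
-- A raises IndexError unless len(a) >= 10 (ds[1] needs len>=2, the loop reads a[0..9]).
def Pre_cau7 (a : List Int) : Prop := 10 ≤ a.length
instance (a : List Int) : Decidable (Pre_cau7 a) := by unfold Pre_cau7; infer_instance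
def pvWitness_cau7 : List Int := [1, 2, 3, 4, 5, 6, 7, 8, 9, 10]

def Spec_cau7 (a : List Int) (out : Int × List Int) : Prop := out = cau7_alt a
instance (a : List Int) (out : Int × List Int) : Decidable (Spec_cau7 a out) := by unfold Spec_cau7; infer_instance

-- ===== CLAIM (what is proved, stated in full; the proofs are below) =====
def Claim_equal_cau7 : Prop := ∀ (a : List Int), Dom_cau7 a → Pre_cau7 a → Spec_cau7 a (cau7 a)

-- ===== LEMMAS AND PROOFS =====

-- Invariant of B's two-slot fold: the state is the top two of the elements seen so far,
-- the rest (as a multiset) all ≤ the second slot.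
theorem twoMax_inv (rest : List Int) : ∀ (f s : Int) (r : Multiset Int),
    s ≤ f → (∀ y ∈ r, y ≤ s) →
    ∃ (F S : Int) (R : Multiset Int),
      rest.foldl (fun (p : Int × Int) x =>
          if x > p.1 then (x, p.1) else if x > p.2 then (p.1, x) else p) (f, s) = (F, S) ∧
      S ≤ F ∧ (∀ y ∈ R, y ≤ S) ∧
      f ::ₘ (s ::ₘ (r + (rest : Multiset Int))) = F ::ₘ (S ::ₘ R) := by
  induction rest with
  | nil =>
      intro f s r hsf hr
      exact ⟨f, s, r, rfl, hsf, hr, by simp⟩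
  | cons x xs ih =>
      intro f s r hsf hr
      have hxxs : ((x :: xs : List Int) : Multiset Int) = x ::ₘ (xs : Multiset Int) := by simp
      by_cases h1 : x > f
      · have hcond : ∀ y ∈ (s ::ₘ r), y ≤ f := by
          intro y hy
          rcases Multiset.mem_cons.mp hy with h | h
          · exact h ▸ hsf
          · exact le_trans (hr y h) hsf
        obtain ⟨F, S, R, hfold, hSF, hR, hm⟩ := ih x f (s ::ₘ r) (le_of_lt h1) hcond
        refine ⟨F, S, R, ?_, hSF, hR, ?_⟩
        · simpa [List.foldl_cons, if_pos h1] using hfold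
        · rw [← hm, hxxs]
          simp only [← Multiset.singleton_add]
          abel
      · by_cases h2 : x > s
        · have hcond : ∀ y ∈ (s ::ₘ r), y ≤ x := by
            intro y hy
            rcases Multiset.mem_cons.mp hy with h | h
            · exact h ▸ le_of_lt h2
            · exact le_trans (hr y h) (le_of_lt h2)
          obtain ⟨F, S, R, hfold, hSF, hR, hm⟩ := ih f x (s ::ₘ r) (not_lt.mp h1) hcond
          refine ⟨F, S, R, ?_, hSF, hR, ?_⟩
          · simpa [List.foldl_cons, if_neg h1, if_pos h2] using hfold
          · rw [← hm, hxxs]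
            simp only [← Multiset.singleton_add]
            abel
        · have hcond : ∀ y ∈ (x ::ₘ r), y ≤ s := by
            intro y hy
            rcases Multiset.mem_cons.mp hy with h | h
            · exact h ▸ not_lt.mp h2
            · exact hr y h
          obtain ⟨F, S, R, hfold, hSF, hR, hm⟩ := ih f s (x ::ₘ r) hsf hcond
          refine ⟨F, S, R, ?_, hSF, hR, ?_⟩
          · simpa [List.foldl_cons, if_neg h1, if_neg h2] using hfold
          · rw [← hm, hxxs]
            simp only [← Multiset.singleton_add]
            abel

-- The second element of sorted(l, reverse=True) is S when l's multiset is F ::ₘ S ::ₘ R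
-- with S ≤ F and everything in R ≤ S.
theorem sorted_second (l : List Int) (F S : Int) (R : Multiset Int)
    (hm : (l : Multiset Int) = F ::ₘ (S ::ₘ R)) (hSF : S ≤ F) (hR : ∀ y ∈ R, y ≤ S) :
    PySem.List.pyGet? (PySem.List.sorted l (fun x => x) true) 1 = some S := by
  have hperm : (PySem.List.sorted l (fun x => x) true).Perm l := PySem.List.sorted_perm ..
  have hmds : ((PySem.List.sorted l (fun x => x) true : List Int) : Multiset Int)
      = F ::ₘ (S ::ₘ R) := by
    rw [Multiset.coe_eq_coe.mpr hperm, hm]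
  have hpw : (PySem.List.sorted l (fun x => x) true).Pairwise (fun a b => b ≤ a) := by
    simpa using PySem.List.sorted_pairwise_rev l (fun x => x)
  set ds := PySem.List.sorted l (fun x => x) true with hds
  clear_value ds
  have hlen : 2 ≤ ds.length := by
    have h2 := congrArg Multiset.card hmds
    simp at h2
    omega
  match ds, hmds, hpw, hlen with
  | [], hmds, hpw, hlen => simp at hlen
  | [d0], hmds, hpw, hlen => simp at hlen
  | d0 :: d1 :: dt, hmds, hpw, hlen =>
    -- d0 = F
    have hd0mem : d0 ∈ F ::ₘ (S ::ₘ R) := by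
      rw [← hmds]; simp
    have hd0le : d0 ≤ F := by
      rcases Multiset.mem_cons.mp hd0mem with h | h
      · exact h.le
      · rcases Multiset.mem_cons.mp h with h | h
        · exact h ▸ hSF
        · exact le_trans (hR _ h) hSF
    have hFmem : F ∈ (d0 :: d1 :: dt : List Int) := by
      have : F ∈ ((d0 :: d1 :: dt : List Int) : Multiset Int) := by rw [hmds]; simp
      simpa using this
    have hFle : F ≤ d0 := by
      cases hFmem with
      | head => exact le_refl _
      | tail _ h => exact List.rel_of_pairwise_cons hpw h
    have hd0F : d0 = F := le_antisymm hd0le hFle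
    -- cancel the head
    have htail : ((d1 :: dt : List Int) : Multiset Int) = S ::ₘ R := by
      have hc : d0 ::ₘ ((d1 :: dt : List Int) : Multiset Int) = F ::ₘ (S ::ₘ R) := by
        simpa using hmds
      rw [hd0F] at hc
      exact (Multiset.cons_inj_right F).mp hc
    -- d1 ≤ S
    have hd1mem : d1 ∈ S ::ₘ R := by rw [← htail]; simp
    have hd1le : d1 ≤ S := by
      rcases Multiset.mem_cons.mp hd1mem with h | h
      · exact h.le
      · exact hR _ h
    -- S ≤ d1
    have hSmem : S ∈ (d1 :: dt : List Int) := by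
      have : S ∈ ((d1 :: dt : List Int) : Multiset Int) := by rw [htail]; simp
      simpa using this
    have hpw1 : (d1 :: dt : List Int).Pairwise (fun a b => b ≤ a) := hpw.of_cons
    have hSle : S ≤ d1 := by
      cases hSmem with
      | head => exact le_refl _
      | tail _ h => exact List.rel_of_pairwise_cons hpw1 h
    have hd1S : d1 = S := le_antisymm hd1le hSle
    subst hd1S
    rw [show (1:Int) = ((1:Nat):Int) by norm_num, PySem.List.pyGet?_natCast]
    simp

-- A's appending index loop equals B's filterMap comprehension over the same range.
theorem loop_eq (nhi : Int) (a : List Int) : ∀ (l : List Int) (acc : List Int),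
    l.foldl (fun vt x =>
        match PySem.List.pyGet? a x with
        | none => vt
        | some v => if v == nhi then vt ++ [x + 1] else vt) acc
    = acc ++ l.filterMap (fun x =>
        match PySem.List.pyGet? a x with
        | none => none
        | some v => if v == nhi then some (x + 1) else none) := by
  intro l
  induction l with
  | nil => intro acc; simp
  | cons x xs ih =>
      intro acc
      rw [List.foldl_cons, List.filterMap_cons]
      rcases hx : PySem.List.pyGet? a x with _ | v
      · simp only []
        rw [ih]
      · simp only []
        by_cases hv : v == nhi
        · simp only [if_pos hv]
          rw [ih, List.append_assoc]
          rfl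
        · simp only [if_neg hv]
          rw [ih]

theorem cau7_main (a0 a1 : Int) (rest : List Int)
    (f s : Int) (hseed : (if a1 > a0 then (a1, a0) else (a0, a1)) = (f, s)) (hsf : s ≤ f)
    (hswap : (((a0 :: a1 :: rest : List Int)) : Multiset Int)
        = f ::ₘ (s ::ₘ ((0 : Multiset Int) + (rest : Multiset Int)))) :
    cau7 (a0 :: a1 :: rest) = cau7_alt (a0 :: a1 :: rest) := by
  obtain ⟨F, S, R, hfold, hSF, hR, hm⟩ :=
    twoMax_inv rest f s 0 hsf (by intro y hy; simp at hy)
  have hma : (((a0 :: a1 :: rest : List Int)) : Multiset Int) = F ::ₘ (S ::ₘ R) := by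
    rw [hswap, hm]
  have hsecond := sorted_second (a0 :: a1 :: rest) F S R hma hSF hR
  have hlA := loop_eq S (a0 :: a1 :: rest) (PySem.List.pyRange 0 10 1) []
  simp only [cau7, cau7_alt, hsecond, hseed, hfold, hlA, List.nil_append]

theorem cau7_spec : Claim_equal_cau7 := by
  intro a _ hpre
  unfold Pre_cau7 at hpre
  unfold Spec_cau7
  rcases a with _ | ⟨a0, _ | ⟨a1, rest⟩⟩
  · simp at hpre
  · simp at hpre
  · by_cases hseed : a1 > a0
    · exact cau7_main a0 a1 rest a1 a0 (if_pos hseed) (le_of_lt hseed)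
        (by
          have h1 : ((a0 :: a1 :: rest : List Int) : Multiset Int)
              = a0 ::ₘ (a1 ::ₘ (rest : Multiset Int)) := by simp
          rw [h1, Multiset.cons_swap]
          simp)
    · exact cau7_main a0 a1 rest a0 a1 (if_neg hseed) (not_lt.mp hseed)
        (by simp)
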